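-- pv_equiv track=rewrite | github.com/patakk/zhongwen | hanzi-search/app.py | expand_pinyin_wildcards
-- ===== SOURCE A (Python) =====
-- def expand_pinyin_wildcards(term):
--     if '*' not in term:
--         return [term]
--     replacements = ['1', '2', '3', '4', '5', '']
--     expanded = ['']
--     for ch in term:
--         if ch == '*':
--             expanded = [prefix + rep for prefix in expanded for rep in replacements]
--         else:
--             expanded = [prefix + ch for prefix in expanded]
--     uniq = []
--     seen = set()
--     for t in expanded:
--         if not t or t in seen:
--             continue
--         seen.add(t)
--         uniq.append(t)
--     return uniq
-- ===== SOURCE B (Python) =====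
-- def expand_pinyin_wildcards(term):
--     if '*' not in term:
--         return [term]
--
--     def gen(parts):
--         if len(parts) == 1:
--             return [parts[0]]
--         rest = gen(parts[1:])
--         out = []
--         for rep in ('1', '2', '3', '4', '5', ''):
--             out.extend(parts[0] + rep + tail for tail in rest)
--         return out
--
--     return list(dict.fromkeys(t for t in gen(term.split('*')) if t))
-- ===== Notes on version B (the rewrite author's own statement) =====
-- stated objective: alternative
-- what changed: Instead of A's per-character list-comprehension passes over the whole term and an explicit seen-set dedup loop, B splits the term on '*' once, generates candidates by recursion on the parts list (tone chosen at the first slot outermost, suffixes built recursively), and dedups with dict.fromkeys over the non-empty candidates.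
import Mathlib
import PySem

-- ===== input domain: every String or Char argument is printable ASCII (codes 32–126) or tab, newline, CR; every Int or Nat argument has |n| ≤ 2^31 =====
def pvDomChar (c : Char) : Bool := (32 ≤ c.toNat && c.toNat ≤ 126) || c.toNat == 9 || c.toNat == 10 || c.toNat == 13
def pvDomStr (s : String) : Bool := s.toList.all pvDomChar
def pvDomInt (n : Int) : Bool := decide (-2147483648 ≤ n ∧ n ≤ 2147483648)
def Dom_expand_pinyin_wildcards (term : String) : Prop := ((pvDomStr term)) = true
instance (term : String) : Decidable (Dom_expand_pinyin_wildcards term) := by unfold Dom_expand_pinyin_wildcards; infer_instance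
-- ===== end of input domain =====

-- B replaces A's character-by-character expansion passes and explicit seen-set dedup loop by
-- splitting the term once on '*', generating candidates recursively over the parts list, and
-- deduplicating the non-empty candidates with dict.fromkeys (objective: alternative decomposition).

-- ===== PORT A =====
-- (list-of-code-points side; strings are rebuilt with String.ofList at the end, which is exact)
def pvRepsA : List (List Char) := [['1'], ['2'], ['3'], ['4'], ['5'], []]

def pvStepA (exp : List (List Char)) (ch : Char) : List (List Char) :=
  if ch = '*' then exp.flatMap (fun p => pvRepsA.map (fun r => p ++ r))
  else exp.map (fun p => p ++ [ch])

def pvDedupA (ts : List (List Char)) : List (List Char) :=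
  (ts.foldl (fun (st : List (List Char) × PySem.Set (List Char)) t =>
      if t = [] ∨ PySem.Set.contains st.2 t = true then st
      else (st.1 ++ [t], PySem.Set.add st.2 t)) ([], PySem.Set.empty)).1

def expand_pinyin_wildcards (term : String) : List String :=
  if PySem.Str.isIn "*" term = false then [term]
  else (pvDedupA (term.toList.foldl pvStepA [[]])).map String.ofList

-- ===== PORT B =====
def pvRepsB : List (List Char) := [['1'], ['2'], ['3'], ['4'], ['5'], []]

-- the recursive `gen(parts)`: tone of the FIRST slot chosen outermost, suffixes built recursively
def pvGenB : List (List Char) → List (List Char)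
  | [] => []
  | [p] => [p]
  | p :: q :: ps =>
      let rest := pvGenB (q :: ps)
      pvRepsB.foldl (fun out rep => out ++ rest.map (fun t => p ++ rep ++ t)) []

def expand_pinyin_wildcards_alt (term : String) : List String :=
  if PySem.Str.isIn "*" term = false then [term]
  else
    (PySem.List.dedup ((pvGenB (term.toList.splitOn '*')).filter (fun t => t ≠ []))).map
      String.ofList

-- ===== PRECONDITION & SPEC =====
def Spec_expand_pinyin_wildcards (term : String) (out : List String) : Prop := out = expand_pinyin_wildcards_alt term
instance (term : String) (out : List String) : Decidable (Spec_expand_pinyin_wildcards term out) := by unfold Spec_expand_pinyin_wildcards; infer_instance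

-- ===== CLAIM (what is proved, stated in full; the proofs are below) =====
def Claim_equal_expand_pinyin_wildcards : Prop := ∀ (term : String), Dom_expand_pinyin_wildcards term → Spec_expand_pinyin_wildcards term (expand_pinyin_wildcards term)

-- ===== LEMMAS AND PROOFS =====

-- proof-layer helper: one step of A's expansion, rephrased per split part
def pvStepP (cands : List (List Char)) (part : List Char) : List (List Char) :=
  cands.flatMap (fun c => pvRepsA.map (fun r => c ++ r ++ part))

-- A's dedup loop keeps its list and its seen-set equal; it computes dict.fromkeys of the
-- non-empty candidates
lemma pvDedupA_eq (ts : List (List Char)) :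
    pvDedupA ts = PySem.List.dedup (ts.filter (fun t => t ≠ [])) := by
  have key : ∀ (ts : List (List Char)) (s : PySem.Set (List Char)),
      (ts.foldl (fun (st : List (List Char) × PySem.Set (List Char)) t =>
        if t = [] ∨ PySem.Set.contains st.2 t = true then st
        else (st.1 ++ [t], PySem.Set.add st.2 t)) (s, s)).1
      = (ts.filter (fun t => t ≠ [])).foldl PySem.Set.add s := by
    intro ts
    induction ts with
    | nil => intro s; rfl
    | cons t ts ih =>
      intro s
      rw [List.foldl_cons, List.filter_cons]
      by_cases h0 : t = []
      · have hft : (decide (t ≠ []) : Bool) = false := by simp [h0]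
        rw [hft, if_neg Bool.false_ne_true, if_pos (Or.inl h0)]
        exact ih s
      · have hft : (decide (t ≠ []) : Bool) = true := by simp [h0]
        rw [hft, if_pos rfl, List.foldl_cons]
        by_cases hc : PySem.Set.contains s t = true
        · have hadd : PySem.Set.add s t = s := by
            have hm : t ∈ s := by simpa using hc
            simp [PySem.Set.add, hm]
          rw [if_pos (Or.inr hc), hadd]
          exact ih s
        · have hadd : PySem.Set.add s t = s ++ [t] := by
            have hm : t ∉ s := by simpa using hc
            simp [PySem.Set.add, hm]
          rw [if_neg (by push Not; exact ⟨h0, hc⟩), hadd]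
          exact ih (s ++ [t])
  rw [pvDedupA]
  simpa [PySem.Set.empty, PySem.List.dedup_eq_ofList, PySem.Set.ofList_eq_foldl]
    using key ts PySem.Set.empty

-- A's character-by-character fold equals the per-part fold pvStepP over the split
lemma foldA_eq (cs : List Char) : ∀ acc : List (List Char),
    cs.foldl pvStepA acc =
      (match cs.splitOnP (· == '*') with
       | [] => acc
       | p :: ps => ps.foldl pvStepP (acc.map (· ++ p))) := by
  induction cs with
  | nil => intro acc; simp [List.splitOnP_nil]
  | cons x xs ih =>
    intro acc
    rw [List.foldl_cons, ih (pvStepA acc x), List.splitOnP_cons]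
    obtain ⟨q, qs, hq⟩ : ∃ q qs, xs.splitOnP (· == '*') = q :: qs := by
      rcases h : xs.splitOnP (· == '*') with _ | ⟨q, qs⟩
      · exact absurd h (List.splitOnP_ne_nil _ _)
      · exact ⟨q, qs, rfl⟩
    by_cases hx : x = '*'
    · simp only [hx, hq, List.modifyHead, beq_self_eq_true, if_pos]
      rw [List.foldl_cons]
      congr 1
      simp [pvStepA, pvStepP, pvRepsA, List.map_flatMap, List.append_assoc]
    · have : (x == '*') = false := by simp [hx]
      simp only [this, hq, List.modifyHead, if_neg Bool.false_ne_true]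
      congr 1
      simp [pvStepA, hx, List.map_map, Function.comp_def, List.append_assoc]

-- pvStepP distributes over list append, hence so does folding it
lemma foldP_append (ps : List (List Char)) :
    ∀ l1 l2 : List (List Char),
      ps.foldl pvStepP (l1 ++ l2) = ps.foldl pvStepP l1 ++ ps.foldl pvStepP l2 := by
  induction ps with
  | nil => intro l1 l2; simp
  | cons q qs ih =>
    intro l1 l2
    have : pvStepP (l1 ++ l2) q = pvStepP l1 q ++ pvStepP l2 q := by
      simp [pvStepP]
    simp [this, ih]

-- prepending a fixed prefix to the first part maps the fixed prefix over all candidates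
lemma pvGenB_prefix (ps : List (List Char)) (a p : List Char) :
    pvGenB ((a ++ p) :: ps) = (pvGenB (p :: ps)).map (a ++ ·) := by
  cases ps with
  | nil => simp [pvGenB]
  | cons q qs =>
    simp [pvGenB, pvRepsB, List.map_map, Function.comp_def, List.append_assoc]

-- folding pvStepP from a single start equals B's recursive generation
lemma foldP_eq_genB (ps : List (List Char)) : ∀ p : List Char,
    ps.foldl pvStepP [p] = pvGenB (p :: ps) := by
  induction ps with
  | nil => intro p; simp [pvGenB]
  | cons q qs ih =>
    intro p
    rw [List.foldl_cons]
    have hstep : pvStepP [p] q =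
        [p ++ ['1'] ++ q] ++ [p ++ ['2'] ++ q] ++ [p ++ ['3'] ++ q]
          ++ [p ++ ['4'] ++ q] ++ [p ++ ['5'] ++ q] ++ [p ++ q] := by
      simp [pvStepP, pvRepsA]
    rw [hstep, foldP_append, foldP_append, foldP_append, foldP_append, foldP_append,
        ih, ih, ih, ih, ih, ih]
    rw [show p ++ ['1'] ++ q = (p ++ ['1']) ++ q from by simp,
        show p ++ ['2'] ++ q = (p ++ ['2']) ++ q from by simp,
        show p ++ ['3'] ++ q = (p ++ ['3']) ++ q from by simp,
        show p ++ ['4'] ++ q = (p ++ ['4']) ++ q from by simp,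
        show p ++ ['5'] ++ q = (p ++ ['5']) ++ q from by simp]
    rw [pvGenB_prefix, pvGenB_prefix, pvGenB_prefix, pvGenB_prefix, pvGenB_prefix]
    conv_lhs => rw [show pvGenB ((p ++ q) :: qs) = (pvGenB (q :: qs)).map (p ++ ·) from
      pvGenB_prefix qs p q]
    simp [pvGenB, pvRepsB, List.append_assoc]

-- ===== VERDICT (by name: the statement is the Claim_ definition above) =====
theorem expand_pinyin_wildcards_spec : Claim_equal_expand_pinyin_wildcards := by
  intro term _
  unfold Spec_expand_pinyin_wildcards expand_pinyin_wildcards expand_pinyin_wildcards_alt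
  by_cases h : PySem.Str.isIn "*" term = false
  · rw [if_pos h, if_pos h]
  · rw [if_neg h, if_neg h, pvDedupA_eq, foldA_eq]
    have hsplit : term.toList.splitOn '*' = term.toList.splitOnP (· == '*') := rfl
    rw [hsplit]
    rcases hq : term.toList.splitOnP (· == '*') with _ | ⟨q, qs⟩
    · exact absurd hq (List.splitOnP_ne_nil _ _)
    · simp [foldP_eq_genB]
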